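-- pv_equiv track=rewrite | github.com/timvieira/transduction | transduction/general_token_decompose.py | _compute_universality
-- ===== SOURCE A (Python) =====
-- def _compute_universality(states, arcs, final, source_alphabet):
--     """Greatest fixpoint: find position sets that accept source_alphabet*.
--
--     A position set ps is universal iff:
--     1. It is final
--     2. For every source symbol a, arcs[ps][a] exists and is also universal
--
--     This is the greatest fixpoint of these constraints.
--     """
--     # Initial candidates: final states with arcs for every source symbol
--     candidates = set()
--     for ps in states:
--         if not final.get(ps, False):
--             continue
--         state_arcs = arcs.get(ps, {})
--         if all(a in state_arcs for a in source_alphabet):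
--             candidates.add(ps)
--
--     changed = True
--     while changed:
--         changed = False
--         to_remove = set()
--         for ps in candidates:
--             state_arcs = arcs.get(ps, {})
--             for a in source_alphabet:
--                 if state_arcs.get(a) not in candidates:
--                     to_remove.add(ps)
--                     break
--         if to_remove:
--             candidates -= to_remove
--             changed = True
--
--     return candidates
-- ===== SOURCE B (Python) =====
-- def _compute_universality(states, arcs, final, source_alphabet):
--     """Worklist greatest-fixpoint: recheck only predecessors of removed states."""
--     # Initial candidates (kept as an ordered list without duplicates)
--     cand = []
--     for ps in states:
--         if ps not in cand and final.get(ps, False):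
--             state_arcs = arcs.get(ps, {})
--             if all(a in state_arcs for a in source_alphabet):
--                 cand.append(ps)
--
--     # Reverse-dependency graph: preds[q] = candidates with an arc into q
--     preds = {}
--     for ps in cand:
--         state_arcs = arcs.get(ps, {})
--         for a in source_alphabet:
--             q = state_arcs.get(a)
--             if q is not None:
--                 preds.setdefault(q, []).append(ps)
--
--     alive = set(cand)
--     queue = list(cand)
--     i = 0
--     while i < len(queue):
--         ps = queue[i]
--         i += 1
--         if ps not in alive:
--             continue
--         state_arcs = arcs.get(ps, {})
--         if any(state_arcs.get(a) not in alive for a in source_alphabet):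
--             alive.discard(ps)
--             queue.extend(preds.get(ps, []))
--     return alive
-- ===== Notes on version B (the rewrite author's own statement) =====
-- stated objective: alternative
-- what changed: A repeats full sweeps over the whole candidate set until a pass removes nothing; B builds a reverse-dependency (predecessor) graph once and runs a worklist fixpoint that rechecks only the predecessors of a state when it is removed.
import Mathlib
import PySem

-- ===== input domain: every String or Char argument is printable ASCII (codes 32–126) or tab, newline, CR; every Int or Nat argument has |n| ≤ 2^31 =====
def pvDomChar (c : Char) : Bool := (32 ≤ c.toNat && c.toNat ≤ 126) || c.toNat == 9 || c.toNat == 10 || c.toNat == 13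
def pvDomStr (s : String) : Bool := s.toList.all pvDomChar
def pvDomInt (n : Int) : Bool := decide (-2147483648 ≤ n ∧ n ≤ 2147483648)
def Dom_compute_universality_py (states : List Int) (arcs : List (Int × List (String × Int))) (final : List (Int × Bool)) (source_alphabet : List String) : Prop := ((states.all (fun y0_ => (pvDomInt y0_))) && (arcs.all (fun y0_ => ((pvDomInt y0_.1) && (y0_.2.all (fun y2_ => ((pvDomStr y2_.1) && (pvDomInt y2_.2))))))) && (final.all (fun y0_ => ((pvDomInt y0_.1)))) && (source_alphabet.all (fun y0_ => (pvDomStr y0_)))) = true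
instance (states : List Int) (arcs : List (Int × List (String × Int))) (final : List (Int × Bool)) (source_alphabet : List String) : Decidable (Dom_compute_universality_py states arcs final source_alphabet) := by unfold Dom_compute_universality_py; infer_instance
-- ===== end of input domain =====

-- B replaces A's repeated full-sweep removal rounds with a worklist fixpoint over a
-- precomputed predecessor graph, rechecking only the predecessors of a removed state.

-- ===== PORT A =====

-- arcs.get(ps, {}) — the (dict of) arcs leaving position set ps
def pvA_arcsOf (arcs : List (Int × List (String × Int))) (ps : Int) : PySem.Dict String Int :=
  PySem.Dict.mk ((PySem.Dict.mk arcs).getD ps [])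

-- 'for a in source_alphabet: if state_arcs.get(a) not in candidates: … break'
def pvA_bad (arcs : List (Int × List (String × Int))) (alphabet : List String)
    (cand : PySem.Set Int) (ps : Int) : Bool :=
  alphabet.any (fun a =>
    match (pvA_arcsOf arcs ps).get? a with
    | some q => !(PySem.Set.contains cand q)
    | none => true)

-- needed by pvA_loop's decreasing_by (used by name there)
theorem pvA_foldl_addIf {α : Type} [BEq α] (p : α → Bool) :
    ∀ (l : List α) (s : PySem.Set α),
      l.foldl (fun s y => if p y then PySem.Set.add s y else s) s
        = PySem.Set.update s (l.filter p) := by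
  intro l
  induction l with
  | nil => intro s; simp [PySem.Set.update_nil]
  | cons x t ih =>
      intro s
      by_cases h : p x
      · simp [List.foldl_cons, h, ih, PySem.Set.update_cons]
      · simp [List.foldl_cons, h, ih]

-- to_remove = the candidates the current sweep finds bad
def pvA_toRemove (arcs : List (Int × List (String × Int))) (alphabet : List String)
    (cand : PySem.Set Int) : PySem.Set Int :=
  cand.foldl (fun tr ps => if pvA_bad arcs alphabet cand ps then PySem.Set.add tr ps else tr) []

-- needed by pvA_loop's decreasing_by (used by name there)
theorem pvA_diff_toRemove_lt (arcs alphabet) (cand : PySem.Set Int)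
    (h : ¬ (pvA_toRemove arcs alphabet cand).isEmpty = true) :
    (PySem.Set.diff cand (pvA_toRemove arcs alphabet cand)).length < cand.length := by
  simp only [PySem.Set.diff]
  rw [List.length_filter_lt_length_iff_exists]
  rw [pvA_toRemove, pvA_foldl_addIf, PySem.Set.update_nil_left] at h ⊢
  rcases List.exists_mem_of_ne_nil _ (by simpa [List.isEmpty_iff] using h) with ⟨x, hx⟩
  have hx' := (PySem.Set.mem_ofList _ _).1 hx
  exact ⟨x, (List.mem_filter.1 hx').1, by
    simp only [Bool.not_eq_true', Bool.not_eq_false, PySem.Set.contains_eq_listContains,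
      List.contains_iff_mem]
    exact hx⟩

-- 'while changed: … to_remove = {…}; candidates -= to_remove'
def pvA_loop (arcs : List (Int × List (String × Int))) (alphabet : List String)
    (cand : PySem.Set Int) : List Int :=
  if h : (pvA_toRemove arcs alphabet cand).isEmpty then cand
  else pvA_loop arcs alphabet (PySem.Set.diff cand (pvA_toRemove arcs alphabet cand))
termination_by cand.length
decreasing_by
  exact pvA_diff_toRemove_lt arcs alphabet cand h

-- initial candidates: final states with an arc for every source symbol
def pvA_init (states : List Int) (arcs : List (Int × List (String × Int)))
    (final : List (Int × Bool)) (alphabet : List String) : PySem.Set Int :=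
  states.foldl (fun c ps =>
    if (PySem.Dict.mk final).getD ps false then
      (if alphabet.all (fun a => (pvA_arcsOf arcs ps).contains a)
       then PySem.Set.add c ps else c)
    else c) []

def compute_universality_py (states : List Int) (arcs : List (Int × List (String × Int))) (final : List (Int × Bool)) (source_alphabet : List String) : List Int :=
  pvA_loop arcs source_alphabet (pvA_init states arcs final source_alphabet)

-- ===== PORT B =====

def pvB_arcsOf (arcs : List (Int × List (String × Int))) (ps : Int) : PySem.Dict String Int :=
  PySem.Dict.mk ((PySem.Dict.mk arcs).getD ps [])

-- final.get(ps, False) and all(a in state_arcs for a in source_alphabet)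
def pvB_qual (arcs : List (Int × List (String × Int))) (final : List (Int × Bool))
    (alphabet : List String) (ps : Int) : Bool :=
  (PySem.Dict.mk final).getD ps false &&
    alphabet.all (fun a => (pvB_arcsOf arcs ps).contains a)

-- the ordered duplicate-free candidate list
def pvB_init (states : List Int) (arcs : List (Int × List (String × Int)))
    (final : List (Int × Bool)) (alphabet : List String) : List Int :=
  states.foldl (fun c ps =>
    if !(c.contains ps) && pvB_qual arcs final alphabet ps then c ++ [ps] else c) []

-- preds[q] = candidates with an arc into q (reverse-dependency graph)
def pvB_preds (arcs : List (Int × List (String × Int))) (alphabet : List String)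
    (cand : List Int) : PySem.Dict Int (List Int) :=
  cand.foldl (fun d ps =>
    alphabet.foldl (fun d a =>
      match (pvB_arcsOf arcs ps).get? a with
      | some q => d.modify q [] (fun l => l ++ [ps])
      | none => d) d) PySem.Dict.empty

-- any(state_arcs.get(a) not in alive for a in source_alphabet)
def pvB_dead (arcs : List (Int × List (String × Int))) (alphabet : List String)
    (alive : PySem.Set Int) (ps : Int) : Bool :=
  alphabet.any (fun a =>
    match (pvB_arcsOf arcs ps).get? a with
    | some q => !(PySem.Set.contains alive q)
    | none => true)

-- needed by pvB_loop's decreasing_by (used by name there)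
theorem pvB_length_discard_lt {α : Type} [BEq α] [LawfulBEq α] (s : PySem.Set α) (x : α)
    (h : PySem.Set.contains s x = true) : (PySem.Set.discard s x).length < s.length := by
  simp only [PySem.Set.discard]
  rw [List.length_filter_lt_length_iff_exists]
  exact ⟨x, by simpa [PySem.Set.contains_eq_listContains, List.contains_iff_mem] using h,
    by simp⟩

-- the worklist loop
def pvB_loop (arcs : List (Int × List (String × Int))) (alphabet : List String)
    (preds : PySem.Dict Int (List Int)) (alive : PySem.Set Int) (queue : List Int) : List Int :=
  match queue with
  | [] => alive
  | ps :: rest =>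
      if hmem : PySem.Set.contains alive ps then
        if pvB_dead arcs alphabet alive ps then
          pvB_loop arcs alphabet preds (PySem.Set.discard alive ps) (rest ++ preds.getD ps [])
        else
          pvB_loop arcs alphabet preds alive rest
      else
        pvB_loop arcs alphabet preds alive rest
termination_by (alive.length, queue.length)
decreasing_by
  · exact Prod.Lex.left _ _ (pvB_length_discard_lt alive ps hmem)
  · exact Prod.Lex.right _ (by simp)
  · exact Prod.Lex.right _ (by simp)

def compute_universality_py_alt (states : List Int) (arcs : List (Int × List (String × Int))) (final : List (Int × Bool)) (source_alphabet : List String) : List Int :=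
  pvB_loop arcs source_alphabet
    (pvB_preds arcs source_alphabet (pvB_init states arcs final source_alphabet))
    (PySem.Set.ofList (pvB_init states arcs final source_alphabet))
    (pvB_init states arcs final source_alphabet)

-- ===== PRECONDITION & SPEC =====
def Spec_compute_universality_py (states : List Int) (arcs : List (Int × List (String × Int))) (final : List (Int × Bool)) (source_alphabet : List String) (out : List Int) : Prop := out = compute_universality_py_alt states arcs final source_alphabet
instance (states : List Int) (arcs : List (Int × List (String × Int))) (final : List (Int × Bool)) (source_alphabet : List String) (out : List Int) : Decidable (Spec_compute_universality_py states arcs final source_alphabet out) := by unfold Spec_compute_universality_py; infer_instance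

-- ===== CLAIM (what is proved, stated in full; the proofs are below) =====
def Claim_equal_compute_universality_py : Prop := ∀ (states : List Int) (arcs : List (Int × List (String × Int))) (final : List (Int × Bool)) (source_alphabet : List String), Dom_compute_universality_py states arcs final source_alphabet → Spec_compute_universality_py states arcs final source_alphabet (compute_universality_py states arcs final source_alphabet)

-- ===== LEMMAS AND PROOFS =====

-- 'ps can stay': every source symbol has an arc landing inside C
def pvOk (arcs : List (Int × List (String × Int))) (alphabet : List String)
    (C : List Int) (ps : Int) : Prop :=
  ∀ a ∈ alphabet, ∃ q, (pvA_arcsOf arcs ps).get? a = some q ∧ q ∈ C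

theorem pvOk_mono {arcs alphabet} {C C' : List Int} {ps : Int}
    (hsub : ∀ x ∈ C, x ∈ C') (h : pvOk arcs alphabet C ps) : pvOk arcs alphabet C' ps := by
  intro a ha
  rcases h a ha with ⟨q, hq, hqC⟩
  exact ⟨q, hq, hsub q hqC⟩

theorem pvA_bad_false_iff (arcs alphabet) (cand : PySem.Set Int) (ps : Int) :
    pvA_bad arcs alphabet cand ps = false ↔ pvOk arcs alphabet cand ps := by
  simp only [pvA_bad, pvOk, List.any_eq_false]
  constructor
  · intro h a ha
    have := h a ha
    cases hg : (pvA_arcsOf arcs ps).get? a with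
    | none => simp [hg] at this
    | some q =>
        refine ⟨q, rfl, ?_⟩
        simp only [hg, Bool.not_eq_true', Bool.not_eq_false] at this
        simpa [PySem.Set.contains_eq_listContains, List.contains_iff_mem] using this
  · intro h a ha
    rcases h a ha with ⟨q, hq, hmem⟩
    simp [hq, PySem.Set.contains_eq_listContains, hmem]

theorem pvB_dead_false_iff (arcs alphabet) (alive : PySem.Set Int) (ps : Int) :
    pvB_dead arcs alphabet alive ps = false ↔ pvOk arcs alphabet alive ps := by
  simp only [pvB_dead, pvOk, List.any_eq_false]
  constructor
  · intro h a ha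
    have := h a ha
    cases hg : (pvB_arcsOf arcs ps).get? a with
    | none => simp [hg] at this
    | some q =>
        refine ⟨q, by simpa [pvA_arcsOf, pvB_arcsOf] using hg, ?_⟩
        simp only [hg, Bool.not_eq_true', Bool.not_eq_false] at this
        simpa [PySem.Set.contains_eq_listContains, List.contains_iff_mem] using this
  · intro h a ha
    rcases h a ha with ⟨q, hq, hmem⟩
    have hq' : (pvB_arcsOf arcs ps).get? a = some q := by simpa [pvA_arcsOf, pvB_arcsOf] using hq
    simp [hq', PySem.Set.contains_eq_listContains, hmem]

-- the common initial candidate list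
def pvC0 (states : List Int) (arcs : List (Int × List (String × Int)))
    (final : List (Int × Bool)) (alphabet : List String) : List Int :=
  PySem.Set.ofList (states.filter (pvB_qual arcs final alphabet))

theorem pvC0_nodup (states arcs final alphabet) : (pvC0 states arcs final alphabet).Nodup :=
  PySem.Set.nodup_ofList _

theorem pvA_init_eq (states arcs final alphabet) :
    pvA_init states arcs final alphabet = pvC0 states arcs final alphabet := by
  unfold pvA_init pvC0
  have hstep : ∀ (c : PySem.Set Int) (ps : Int), ps ∈ states →
      (if (PySem.Dict.mk final).getD ps false then
        (if alphabet.all (fun a => (pvA_arcsOf arcs ps).contains a)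
         then PySem.Set.add c ps else c)
      else c)
      = (if pvB_qual arcs final alphabet ps then PySem.Set.add c ps else c) := by
    intro c ps _
    have hq : pvB_qual arcs final alphabet ps
        = ((PySem.Dict.mk final).getD ps false
            && alphabet.all (fun a => (pvA_arcsOf arcs ps).contains a)) := rfl
    rw [hq]
    by_cases h1 : (PySem.Dict.mk final).getD ps false <;>
      by_cases h2 : alphabet.all (fun a => (pvA_arcsOf arcs ps).contains a) <;>
        simp [h1, h2]
  have hfold : (states.foldl (fun c ps =>
      if (PySem.Dict.mk final).getD ps false then
        (if alphabet.all (fun a => (pvA_arcsOf arcs ps).contains a)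
         then PySem.Set.add c ps else c)
      else c) ([] : PySem.Set Int))
      = states.foldl (fun c ps =>
          if pvB_qual arcs final alphabet ps then PySem.Set.add c ps else c) [] := by
    apply List.foldl_ext
    exact hstep
  rw [hfold, pvA_foldl_addIf, PySem.Set.update_nil_left]

theorem pvB_init_eq (states arcs final alphabet) :
    pvB_init states arcs final alphabet = pvC0 states arcs final alphabet := by
  unfold pvB_init pvC0
  have hstep : ∀ (c : PySem.Set Int) (ps : Int), ps ∈ states →
      (if !(c.contains ps) && pvB_qual arcs final alphabet ps then c ++ [ps] else c)
      = (if pvB_qual arcs final alphabet ps then PySem.Set.add c ps else c) := by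
    intro c ps _
    by_cases h1 : pvB_qual arcs final alphabet ps <;>
      by_cases h2 : c.contains ps <;>
        simp [PySem.Set.add, PySem.Set.contains, h1]
  have hfold : (states.foldl (fun c ps =>
      if !(c.contains ps) && pvB_qual arcs final alphabet ps then c ++ [ps] else c) [])
      = states.foldl (fun c ps =>
          if pvB_qual arcs final alphabet ps then PySem.Set.add c ps else c) [] := by
    apply List.foldl_ext
    exact hstep
  rw [hfold, pvA_foldl_addIf, PySem.Set.update_nil_left]

-- under Nodup, the sweep's removal set is just a filter and the subtraction another
theorem pvA_toRemove_eq (arcs alphabet) (cand : PySem.Set Int) (hnd : cand.Nodup) :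
    pvA_toRemove arcs alphabet cand = cand.filter (pvA_bad arcs alphabet cand) := by
  rw [pvA_toRemove, pvA_foldl_addIf, PySem.Set.update_nil_left]
  exact PySem.Set.ofList_eq_self_of_nodup _ (hnd.filter _)

theorem pvA_diff_eq (arcs alphabet) (cand : PySem.Set Int) (hnd : cand.Nodup) :
    PySem.Set.diff cand (pvA_toRemove arcs alphabet cand)
      = cand.filter (fun x => !pvA_bad arcs alphabet cand x) := by
  rw [PySem.Set.diff, pvA_toRemove_eq arcs alphabet cand hnd]
  refine List.filter_congr ?_
  intro x hx
  cases hb : pvA_bad arcs alphabet cand x <;>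
    simp [PySem.Set.contains, List.mem_filter, hx, hb]

-- ---- loop A characterisation ----
theorem pvA_loop_props (arcs alphabet) :
    ∀ (cand : PySem.Set Int), cand.Nodup →
      (pvA_loop arcs alphabet cand).Sublist cand ∧
      (∀ ps ∈ pvA_loop arcs alphabet cand, pvOk arcs alphabet (pvA_loop arcs alphabet cand) ps) ∧
      (∀ S : List Int, (∀ x ∈ S, pvOk arcs alphabet S x) → (∀ x ∈ S, x ∈ cand) →
          ∀ x ∈ S, x ∈ pvA_loop arcs alphabet cand) := by
  intro cand
  fun_induction pvA_loop arcs alphabet cand with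
  | case1 cand h =>
      intro hnd
      refine ⟨List.Sublist.refl _, ?_, fun S _ hsub x hx => hsub x hx⟩
      intro ps hps
      rw [pvA_toRemove_eq arcs alphabet cand hnd] at h
      have hb : pvA_bad arcs alphabet cand ps = false := by
        by_contra hb
        have : ps ∈ cand.filter (pvA_bad arcs alphabet cand) :=
          List.mem_filter.2 ⟨hps, by simpa using hb⟩
        rw [List.isEmpty_iff.1 h] at this
        simp at this
      exact (pvA_bad_false_iff arcs alphabet cand ps).1 hb
  | case2 cand h ih =>
      intro hnd
      have hdiff := pvA_diff_eq arcs alphabet cand hnd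
      have hnd' : (PySem.Set.diff cand (pvA_toRemove arcs alphabet cand)).Nodup := by
        rw [hdiff]; exact hnd.filter _
      obtain ⟨ih1, ih2, ih3⟩ := ih hnd'
      refine ⟨ih1.trans (by rw [hdiff]; exact List.filter_sublist), ih2, ?_⟩
      intro S hgood hsub x hx
      refine ih3 S hgood ?_ x hx
      intro y hy
      rw [hdiff]
      have hok : pvOk arcs alphabet cand y := pvOk_mono hsub (hgood y hy)
      have hb : pvA_bad arcs alphabet cand y = false :=
        (pvA_bad_false_iff arcs alphabet cand y).2 hok
      exact List.mem_filter.2 ⟨hsub y hy, by simp [hb]⟩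

-- ---- predecessor-graph completeness ----

-- values recorded in preds are never lost: inner loop
theorem pvB_inner_mono (arcs : List (Int × List (String × Int))) (alph : List String)
    (src x k : Int) (d : PySem.Dict Int (List Int)) (h : x ∈ d.getD k ([] : List Int)) :
    x ∈ (alph.foldl (fun d a =>
      match (pvB_arcsOf arcs src).get? a with
      | some q => d.modify q [] (fun l => l ++ [src])
      | none => d) d).getD k [] := by
  induction alph generalizing d with
  | nil => exact h
  | cons b t ih =>
      simp only [List.foldl_cons]
      apply ih
      cases hg : (pvB_arcsOf arcs src).get? b with
      | none => simpa [hg] using h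
      | some q =>
          simp only [hg]
          rw [PySem.Dict.getD_modify]
          split
          · exact List.mem_append_left _ (by simpa [*] using h)
          · exact h

-- the inner loop records src as a predecessor of each of its targets
theorem pvB_inner_hit (arcs : List (Int × List (String × Int))) (alph : List String)
    (src : Int) (a : String) (ha : a ∈ alph) (ps : Int)
    (hg : (pvB_arcsOf arcs src).get? a = some ps) (d : PySem.Dict Int (List Int)) :
    src ∈ (alph.foldl (fun d a =>
      match (pvB_arcsOf arcs src).get? a with
      | some q => d.modify q [] (fun l => l ++ [src])
      | none => d) d).getD ps [] := by
  induction alph generalizing d with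
  | nil => simp at ha
  | cons b t ih =>
      simp only [List.foldl_cons]
      rcases List.mem_cons.1 ha with hab | hat
      · subst hab
        simp only [hg]
        apply pvB_inner_mono
        rw [PySem.Dict.getD_modify]
        simp
      · exact ih hat _

-- values recorded in preds are never lost: outer loop
theorem pvB_outer_mono (arcs : List (Int × List (String × Int))) (alph : List String)
    (cand : List Int) (x k : Int) (d : PySem.Dict Int (List Int))
    (h : x ∈ d.getD k ([] : List Int)) :
    x ∈ (cand.foldl (fun d ps =>
      alph.foldl (fun d a =>
        match (pvB_arcsOf arcs ps).get? a with
        | some q => d.modify q [] (fun l => l ++ [ps])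
        | none => d) d) d).getD k [] := by
  induction cand generalizing d with
  | nil => exact h
  | cons p t ih =>
      simp only [List.foldl_cons]
      exact ih _ (pvB_inner_mono arcs alph p x k d h)

theorem pvB_preds_complete (arcs alphabet cand) :
    ∀ q ∈ cand, ∀ a ∈ alphabet, ∀ ps,
      (pvA_arcsOf arcs q).get? a = some ps →
      q ∈ (pvB_preds arcs alphabet cand).getD ps [] := by
  unfold pvB_preds
  generalize (PySem.Dict.empty : PySem.Dict Int (List Int)) = d
  induction cand generalizing d with
  | nil => intro q hq; simp at hq
  | cons p t ih =>
      intro q hq a ha ps hg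
      rcases List.mem_cons.1 hq with hqp | hqt
      · subst hqp
        simp only [List.foldl_cons]
        apply pvB_outer_mono
        exact pvB_inner_hit arcs alphabet q a ha ps (by simpa [pvA_arcsOf, pvB_arcsOf] using hg) d
      · simp only [List.foldl_cons]
        exact ih _ q hqt a ha ps hg

-- ---- loop B characterisation ----
theorem pvB_loop_props (arcs alphabet cand) :
    ∀ (alive : PySem.Set Int) (queue : List Int), alive.Nodup →
      (∀ x ∈ alive, x ∈ cand) →
      (∀ ps ∈ alive, ¬ pvOk arcs alphabet alive ps → ps ∈ queue) →
      (pvB_loop arcs alphabet (pvB_preds arcs alphabet cand) alive queue).Sublist alive ∧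
      (∀ ps ∈ pvB_loop arcs alphabet (pvB_preds arcs alphabet cand) alive queue,
        pvOk arcs alphabet (pvB_loop arcs alphabet (pvB_preds arcs alphabet cand) alive queue) ps) ∧
      (∀ S : List Int, (∀ x ∈ S, pvOk arcs alphabet S x) → (∀ x ∈ S, x ∈ alive) →
          ∀ x ∈ S, x ∈ pvB_loop arcs alphabet (pvB_preds arcs alphabet cand) alive queue) := by
  intro alive queue
  fun_induction pvB_loop arcs alphabet (pvB_preds arcs alphabet cand) alive queue with
  | case1 alive =>
      intro hnd hsub hinv
      refine ⟨List.Sublist.refl _, ?_, fun S _ hS x hx => hS x hx⟩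
      intro ps hps
      by_contra hbad
      exact absurd (hinv ps hps hbad) (by simp)
  | case2 alive ps rest hmem hdead ih =>
      intro hnd hsub hinv
      have hmem' : ps ∈ alive := by
        simpa [PySem.Set.contains, List.contains_iff_mem] using hmem
      have hnotok : ¬ pvOk arcs alphabet alive ps := by
        intro hok
        rw [← pvB_dead_false_iff arcs alphabet alive ps] at hok
        simp [hdead] at hok
      have hnd' := PySem.Set.nodup_discard alive ps hnd
      have hsub' : ∀ x ∈ PySem.Set.discard alive ps, x ∈ cand := fun x hx =>
        hsub x ((PySem.Set.mem_discard _ _ _).1 hx).1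
      have hinv' : ∀ q ∈ PySem.Set.discard alive ps,
          ¬ pvOk arcs alphabet (PySem.Set.discard alive ps) q →
          q ∈ rest ++ (pvB_preds arcs alphabet cand).getD ps [] := by
        intro q hq hqbad
        obtain ⟨hqal, hqne⟩ := (PySem.Set.mem_discard _ _ _).1 hq
        by_cases hok : pvOk arcs alphabet alive q
        · -- removing ps is what broke q: q is a recorded predecessor of ps
          have : ∃ a ∈ alphabet, (pvA_arcsOf arcs q).get? a = some ps := by
            by_contra hno
            push Not at hno
            apply hqbad
            intro a ha
            rcases hok a ha with ⟨w, hw, hwal⟩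
            refine ⟨w, hw, (PySem.Set.mem_discard _ _ _).2 ⟨hwal, ?_⟩⟩
            intro hwps
            exact hno a ha (hwps ▸ hw)
          rcases this with ⟨a, ha, hg⟩
          exact List.mem_append_right _ (pvB_preds_complete arcs alphabet cand q (hsub q hqal) a ha ps hg)
        · have := hinv q hqal hok
          rcases List.mem_cons.1 this with h | h
          · exact absurd h hqne
          · exact List.mem_append_left _ h
      obtain ⟨ih1, ih2, ih3⟩ := ih hnd' hsub' hinv'
      refine ⟨ih1.trans List.filter_sublist, ih2, ?_⟩
      intro S hgood hS x hx
      refine ih3 S hgood ?_ x hx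
      intro y hy
      refine (PySem.Set.mem_discard _ _ _).2 ⟨hS y hy, ?_⟩
      intro hyps
      exact hnotok (pvOk_mono hS (hyps ▸ hgood y hy))
  | case3 alive ps rest hmem hdead ih =>
      intro hnd hsub hinv
      have hok : pvOk arcs alphabet alive ps :=
        (pvB_dead_false_iff arcs alphabet alive ps).1 (by simpa using hdead)
      refine ih hnd hsub ?_
      intro q hq hqbad
      rcases List.mem_cons.1 (hinv q hq hqbad) with h | h
      · subst h
        exact absurd hok hqbad
      · exact h
  | case4 alive ps rest hmem ih =>
      intro hnd hsub hinv
      refine ih hnd hsub ?_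
      intro q hq hqbad
      rcases List.mem_cons.1 (hinv q hq hqbad) with h | h
      · subst h
        exact absurd (by simpa [PySem.Set.contains, List.contains_iff_mem] using hq) (by simpa using hmem)
      · exact h

-- two order-preserving selections from a duplicate-free list with the same members coincide
theorem pv_sublist_ext {s₁ s₂ l : List Int} (h1 : s₁.Sublist l) (h2 : s₂.Sublist l)
    (hn : l.Nodup) (h : ∀ x, x ∈ s₁ ↔ x ∈ s₂) : s₁ = s₂ := by
  induction l generalizing s₁ s₂ with
  | nil =>
      rw [List.sublist_nil.1 h1, List.sublist_nil.1 h2]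
  | cons x t ih =>
      have hxt : x ∉ t := (List.nodup_cons.1 hn).1
      have hnt : t.Nodup := (List.nodup_cons.1 hn).2
      have head : ∀ s : List Int, s.Sublist (x :: t) → x ∈ s → ∃ r, s = x :: r ∧ r.Sublist t := by
        intro s hs hxs
        rcases List.sublist_cons_iff.1 hs with hst | ⟨r, hr, hrt⟩
        · exact absurd (hst.mem hxs) hxt
        · exact ⟨r, hr, hrt⟩
      by_cases hx : x ∈ s₁
      · obtain ⟨r₁, hr₁, hrt₁⟩ := head s₁ h1 hx
        obtain ⟨r₂, hr₂, hrt₂⟩ := head s₂ h2 ((h x).1 hx)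
        subst hr₁; subst hr₂
        have : ∀ y, y ∈ r₁ ↔ y ∈ r₂ := by
          intro y
          constructor
          · intro hy
            have hyx : y ≠ x := fun hyx => hxt (hyx ▸ hrt₁.mem hy)
            rcases List.mem_cons.1 ((h y).1 (List.mem_cons_of_mem _ hy)) with hc | hc
            · exact absurd hc hyx
            · exact hc
          · intro hy
            have hyx : y ≠ x := fun hyx => hxt (hyx ▸ hrt₂.mem hy)
            rcases List.mem_cons.1 ((h y).2 (List.mem_cons_of_mem _ hy)) with hc | hc
            · exact absurd hc hyx
            · exact hc
        rw [ih hrt₁ hrt₂ hnt this]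
      · have hx₂ : x ∉ s₂ := fun hc => hx ((h x).2 hc)
        have hst₁ : s₁.Sublist t := by
          rcases List.sublist_cons_iff.1 h1 with hst | ⟨r, hr, _⟩
          · exact hst
          · exact absurd (hr ▸ List.mem_cons_self) hx
        have hst₂ : s₂.Sublist t := by
          rcases List.sublist_cons_iff.1 h2 with hst | ⟨r, hr, _⟩
          · exact hst
          · exact absurd (hr ▸ List.mem_cons_self) hx₂
        exact ih hst₁ hst₂ hnt h

-- ===== VERDICT (by name: the statement is the Claim_ definition above) =====
theorem compute_universality_py_spec : Claim_equal_compute_universality_py := by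
  intro states arcs final alphabet _
  unfold Spec_compute_universality_py compute_universality_py compute_universality_py_alt
  rw [pvA_init_eq, pvB_init_eq]
  set C0 := pvC0 states arcs final alphabet with hC0
  have hnd : C0.Nodup := pvC0_nodup _ _ _ _
  have hof : PySem.Set.ofList C0 = C0 := PySem.Set.ofList_eq_self_of_nodup _ hnd
  rw [hof]
  obtain ⟨hAsub, hAgood, hAgreat⟩ := pvA_loop_props arcs alphabet C0 hnd
  obtain ⟨hBsub, hBgood, hBgreat⟩ := pvB_loop_props arcs alphabet C0 C0 C0 hnd
    (fun x hx => hx)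
    (fun ps hps hbad => hps)
  exact (pv_sublist_ext hAsub (hBsub.trans (List.Sublist.refl _)) hnd (fun x =>
    ⟨fun hx => hBgreat _ hAgood (fun y hy => hAsub.mem hy) x hx,
     fun hx => hAgreat _ hBgood (fun y hy => hBsub.mem hy) x hx⟩)).symm ▸ rfl
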